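-- pv_equiv track=rewrite | github.com/fbchh/likou_alg | code_sx_scd/code_sx_backtrack7_recoverIP.py | core_substr_verify
-- ===== SOURCE A (Python) =====
-- def core_substr_verify(input_str):
--     if len(input_str) == 0:
--         return False
--
--     if input_str[0] == "0" and len(input_str) > 1:
--         return False
--
--     for i in range(len(input_str)):
--         if input_str[i] not in ["0", "1", "2", "3", "4", "5", "6", "7", "8", "9"]:
--             return False
--
--     if int(input_str) > 255:
--         return False
--
--     return True
-- ===== SOURCE B (Python) =====
-- def core_substr_verify(input_str):
--     n = len(input_str)
--     if n == 0 or n > 3: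
--         return False
--     if not all('0' <= c <= '9' for c in input_str):
--         return False
--     if n == 1:
--         return True
--     if input_str[0] == '0':
--         return False
--     return n == 2 or input_str <= "255"
-- ===== Notes on version B (the rewrite author's own statement) =====
-- stated objective: alternative
-- what changed: B never parses the number: it decides validity purely by length cases and character comparisons (length must be 1-3, all chars digits, no leading zero unless single, and for length 3 a lexicographic comparison with "255" replaces the numeric <=255 test), whereas A validates each char against a list and then calls int() and compares arithmetically.
import Mathlib
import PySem

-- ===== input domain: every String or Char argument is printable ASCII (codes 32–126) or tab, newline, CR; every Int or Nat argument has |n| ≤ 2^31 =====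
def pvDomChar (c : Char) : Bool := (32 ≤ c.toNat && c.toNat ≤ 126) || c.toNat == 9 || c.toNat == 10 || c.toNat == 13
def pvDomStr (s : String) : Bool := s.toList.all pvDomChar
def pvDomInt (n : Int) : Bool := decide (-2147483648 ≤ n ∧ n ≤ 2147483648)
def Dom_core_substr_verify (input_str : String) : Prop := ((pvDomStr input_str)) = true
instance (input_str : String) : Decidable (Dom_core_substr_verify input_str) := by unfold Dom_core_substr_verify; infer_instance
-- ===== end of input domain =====

-- B never computes the numeric value: it decides validity by length cases and character
-- comparisons alone (length 1-3, all digits, no leading zero unless single, and for length 3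
-- a lexicographic comparison with "255"), where A parses with int() and compares arithmetically.

-- ===== PORT A =====
-- int(input_str) at A's call site, ported by hand as the decimal fold; exact here because this
-- line is reached only when input_str is nonempty and consists solely of ASCII digits '0'..'9'.
def pvIntOfDigits (cs : List Char) : Int :=
  cs.foldl (fun a c => a * 10 + ((c.toNat : Int) - 48)) 0

def core_substr_verify (input_str : String) : Bool :=
  if input_str.toList.length = 0 then false
  else if PySem.List.pyGet? input_str.toList 0 = some '0' ∧ 1 < input_str.toList.length then false
  else if ¬ (input_str.toList.all fun c => ['0','1','2','3','4','5','6','7','8','9'].contains c) then false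
  else if pvIntOfDigits input_str.toList > 255 then false
  else true

-- ===== PORT B =====
-- Python's lexicographic string comparison s <= t, on the character lists
def pvStrLe : List Char → List Char → Bool
  | [], _ => true
  | _ :: _, [] => false
  | a :: as, b :: bs => if a < b then true else if b < a then false else pvStrLe as bs

def core_substr_verify_alt (input_str : String) : Bool :=
  if input_str.toList.length = 0 ∨ 3 < input_str.toList.length then false
  else if ¬ (input_str.toList.all fun c => '0' ≤ c && c ≤ '9') then false
  else if input_str.toList.length = 1 then true
  else if PySem.List.pyGet? input_str.toList 0 = some '0' then false
  else decide (input_str.toList.length = 2) || pvStrLe input_str.toList ['2', '5', '5']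

-- ===== PRECONDITION & SPEC =====
def Spec_core_substr_verify (input_str : String) (out : Bool) : Prop := out = core_substr_verify_alt input_str
instance (input_str : String) (out : Bool) : Decidable (Spec_core_substr_verify input_str out) := by unfold Spec_core_substr_verify; infer_instance

-- ===== CLAIM (what is proved, stated in full; the proofs are below) =====
def Claim_equal_core_substr_verify : Prop := ∀ (input_str : String), Dom_core_substr_verify input_str → Spec_core_substr_verify input_str (core_substr_verify input_str)

-- ===== LEMMAS AND PROOFS =====

lemma pv_charNat (a b : Char) : a.toNat = b.toNat ↔ a = b := eq_iff_eq_of_cmp_eq_cmp rfl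

lemma pv_charLt (a b : Char) : a < b ↔ a.toNat < b.toNat := by
  rw [Char.lt_def, UInt32.lt_iff_toNat_lt]; rfl

-- A's per-character membership test, as a statement about the character code
lemma pv_digit_test (c : Char) :
    (['0','1','2','3','4','5','6','7','8','9'].contains c) = decide (48 ≤ c.toNat ∧ c.toNat ≤ 57) := by
  have key : ∀ d : Char, (c == d) = decide (c.toNat = d.toNat) := by
    intro d
    rw [Bool.beq_eq_decide_eq]
    simp [pv_charNat]
  simp only [List.contains_cons, List.contains_nil, Bool.or_false, key]
  rw [Bool.eq_iff_iff]
  simp only [Bool.or_eq_true, decide_eq_true_eq]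
  show c.toNat = 48 ∨ c.toNat = 49 ∨ c.toNat = 50 ∨ c.toNat = 51 ∨ c.toNat = 52 ∨ c.toNat = 53
    ∨ c.toNat = 54 ∨ c.toNat = 55 ∨ c.toNat = 56 ∨ c.toNat = 57 ↔ 48 ≤ c.toNat ∧ c.toNat ≤ 57
  omega

-- B's per-character range test, same statement
lemma pv_digit_test_alt (c : Char) :
    (('0' ≤ c && c ≤ '9') : Bool) = decide (48 ≤ c.toNat ∧ c.toNat ≤ 57) := by
  rw [Bool.eq_iff_iff]
  simp [Char.le_def, UInt32.le_iff_toNat_le]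

-- the decimal fold never decreases when the remaining characters are digits
lemma pv_fold_ge (cs : List Char) (v : Int)
    (h : ∀ d ∈ cs, 48 ≤ d.toNat) (hv : 0 ≤ v) :
    v ≤ cs.foldl (fun a c => a * 10 + ((c.toNat : Int) - 48)) v := by
  induction cs generalizing v with
  | nil => simp
  | cons c rest ih =>
      have hc := h c List.mem_cons_self
      have h1 : v ≤ v * 10 + ((c.toNat : Int) - 48) := by omega
      have h2 : (0 : Int) ≤ v * 10 + ((c.toNat : Int) - 48) := by omega
      exact le_trans h1 (ih _ (fun d hd => h d (List.mem_cons_of_mem _ hd)) h2)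

-- for three digit characters, lexicographic comparison with "255" is the numeric comparison
lemma pv_lex3 (c b e : Char)
    (hc : 48 ≤ c.toNat ∧ c.toNat ≤ 57) (hb : 48 ≤ b.toNat ∧ b.toNat ≤ 57)
    (he : 48 ≤ e.toNat ∧ e.toNat ≤ 57) :
    pvStrLe [c, b, e] ['2', '5', '5']
      = decide ((c.toNat : Int) * 100 + (b.toNat : Int) * 10 + (e.toNat : Int) ≤ 5583) := by
  simp only [pvStrLe, pv_charLt]
  show (if c.toNat < 50 then true else if 50 < c.toNat then false
    else if b.toNat < 53 then true else if 53 < b.toNat then false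
    else if e.toNat < 53 then true else if 53 < e.toNat then false else true) = _
  split_ifs <;> rw [Bool.eq_iff_iff] <;> simp <;> omega

-- ===== VERDICT (by name: the statement is the Claim_ definition above) =====
theorem core_substr_verify_spec : Claim_equal_core_substr_verify := by
  intro s _
  show core_substr_verify s = core_substr_verify_alt s
  unfold core_substr_verify core_substr_verify_alt
  generalize s.toList = cs
  cases cs with
  | nil => rfl
  | cons c rest =>
      have hget : PySem.List.pyGet? (c :: rest) 0 = some c := by
        simp [PySem.List.pyGet?, PySem.List.pyIdx?]
      rw [hget, if_neg (show ¬((c :: rest).length = 0) by simp)]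
      by_cases hdig : ((c :: rest).all fun c => ['0','1','2','3','4','5','6','7','8','9'].contains c) = true
      · have hall : ∀ d ∈ c :: rest, 48 ≤ d.toNat ∧ d.toNat ≤ 57 := by
          intro d hd
          have := (List.all_eq_true.mp hdig) d hd
          rw [pv_digit_test] at this
          simpa using this
        have hallB : ((c :: rest).all fun c => '0' ≤ c && c ≤ '9') = true := by
          rw [List.all_eq_true]
          intro d hd
          rw [pv_digit_test_alt]
          simpa using hall d hd
        rw [if_neg (not_not_intro hdig)]
        by_cases hz : c = '0'
        · subst hz
          cases rest with
          | nil =>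
              rw [if_neg (show ¬(some '0' = some '0' ∧ 1 < (['0'] : List Char).length) by simp),
                  if_neg (show ¬ pvIntOfDigits ['0'] > 255 by decide),
                  if_neg (show ¬((['0'] : List Char).length = 0 ∨ 3 < (['0'] : List Char).length) by simp),
                  if_neg (not_not_intro hallB), if_pos (show (['0'] : List Char).length = 1 from rfl)]
          | cons b rs =>
              rw [if_pos (show some '0' = some '0' ∧ 1 < ('0' :: b :: rs).length by
                    exact ⟨rfl, by simp⟩)]
              by_cases hlen : ('0' :: b :: rs).length = 0 ∨ 3 < ('0' :: b :: rs).length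
              · rw [if_pos hlen]
              · rw [if_neg hlen, if_neg (not_not_intro hallB),
                    if_neg (show ¬(('0' :: b :: rs).length = 1) by simp),
                    if_pos (show some '0' = some '0' from rfl)]
        · have hzc : ¬(some c = some '0' ∧ 1 < (c :: rest).length) :=
            fun h => hz (Option.some.inj h.1)
          have hzc' : ¬(some c = some '0') := fun h => hz (Option.some.inj h)
          rw [if_neg hzc]
          have hc := hall c List.mem_cons_self
          cases rest with
          | nil =>
              rw [if_neg (show ¬ pvIntOfDigits [c] > 255 by
                    simp only [pvIntOfDigits, List.foldl]; omega),
                  if_neg (show ¬(([c] : List Char).length = 0 ∨ 3 < ([c] : List Char).length) by simp),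
                  if_neg (not_not_intro hallB), if_pos (show ([c] : List Char).length = 1 from rfl)]
          | cons b rs =>
              have hb := hall b (by simp)
              cases rs with
              | nil =>
                  rw [if_neg (show ¬ pvIntOfDigits [c, b] > 255 by
                        simp only [pvIntOfDigits, List.foldl]; omega),
                      if_neg (show ¬(([c, b] : List Char).length = 0 ∨ 3 < ([c, b] : List Char).length) by simp),
                      if_neg (not_not_intro hallB),
                      if_neg (show ¬(([c, b] : List Char).length = 1) by simp),
                      if_neg hzc']
                  simp
              | cons e ts =>
                  have he := hall e (by simp)
                  cases ts with
                  | nil =>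
                      rw [if_neg (show ¬(([c, b, e] : List Char).length = 0 ∨ 3 < ([c, b, e] : List Char).length) by simp),
                          if_neg (not_not_intro hallB),
                          if_neg (show ¬(([c, b, e] : List Char).length = 1) by simp),
                          if_neg hzc',
                          pv_lex3 c b e hc hb he]
                      have hval : pvIntOfDigits [c, b, e]
                          = (c.toNat : Int) * 100 + (b.toNat : Int) * 10 + (e.toNat : Int) - 5328 := by
                        simp only [pvIntOfDigits, List.foldl]; ring
                      by_cases hbig : pvIntOfDigits [c, b, e] > 255
                      · rw [if_pos hbig]
                        rw [hval] at hbig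
                        simp only [List.length_cons, List.length_nil]
                        rw [Bool.eq_iff_iff]
                        simp
                        omega
                      · rw [if_neg hbig]
                        rw [hval] at hbig
                        simp only [List.length_cons, List.length_nil]
                        rw [Bool.eq_iff_iff]
                        simp
                        omega
                  | cons f us =>
                      have hf := hall f (by simp)
                      rw [if_pos (show pvIntOfDigits (c :: b :: e :: f :: us) > 255 by
                            have hstep : pvIntOfDigits (c :: b :: e :: f :: us)
                                = us.foldl (fun a d => a * 10 + ((d.toNat : Int) - 48))
                                  ((((0 * 10 + ((c.toNat : Int) - 48)) * 10 + ((b.toNat : Int) - 48)) * 10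
                                    + ((e.toNat : Int) - 48)) * 10 + ((f.toNat : Int) - 48)) := rfl
                            have hzc1 : 49 ≤ c.toNat := by
                              rcases Nat.eq_or_lt_of_le hc.1 with h48 | h
                              · exact absurd ((pv_charNat c '0').mp h48.symm) hz
                              · omega
                            have hlb := pv_fold_ge us
                              ((((0 * 10 + ((c.toNat : Int) - 48)) * 10 + ((b.toNat : Int) - 48)) * 10
                                + ((e.toNat : Int) - 48)) * 10 + ((f.toNat : Int) - 48))
                              (fun d hd => (hall d (by simp [hd])).1)
                              (by omega)
                            rw [hstep]
                            omega),
                          if_pos (show ((c :: b :: e :: f :: us).length = 0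
                              ∨ 3 < (c :: b :: e :: f :: us).length) by right; simp)]
      · have hfailB : ¬(((c :: rest).all fun c => '0' ≤ c && c ≤ '9') = true) := by
          intro hB
          apply hdig
          rw [List.all_eq_true] at hB ⊢
          intro d hd
          have := hB d hd
          rw [pv_digit_test_alt] at this
          rw [pv_digit_test]
          exact this
        have tailB : ∀ y : Bool,
            (if ¬(((c :: rest).all fun c => '0' ≤ c && c ≤ '9') = true) then false else y) = false := by
          intro y; rw [if_pos hfailB]
        by_cases hlen : (c :: rest).length = 0 ∨ 3 < (c :: rest).length
        · by_cases hz : some c = some '0' ∧ 1 < (c :: rest).length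
          · rw [if_pos hz, if_pos hlen]
          · rw [if_neg hz, if_pos (show ¬(((c :: rest).all fun c => ['0','1','2','3','4','5','6','7','8','9'].contains c) = true) from hdig), if_pos hlen]
        · by_cases hz : some c = some '0' ∧ 1 < (c :: rest).length
          · rw [if_pos hz, if_neg hlen, tailB]
          · rw [if_neg hz, if_pos (show ¬(((c :: rest).all fun c => ['0','1','2','3','4','5','6','7','8','9'].contains c) = true) from hdig), if_neg hlen, tailB]
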